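-- pv_equiv track=rewrite | github.com/aquanauts/tellus | tellus/tellus_sources/socializer.py | _find_best_pair
-- ===== SOURCE A (Python) =====
-- def _find_best_pair(history, people):
--     best_pair = people[0]
--     for possible_pair in people:
--         if possible_pair not in history:
--             return possible_pair
--
--         if history[possible_pair] < history[best_pair]:
--             best_pair = possible_pair
--
--     return best_pair
-- ===== SOURCE B (Python) =====
-- def _find_best_pair(history, people):
--     # Phase 1: the first person never seen before wins outright.
--     for p in people:
--         if p not in history:
--             return p
--     # Phase 2: everyone is present; the winner is the earliest person whose
--     # history count equals the global minimum count.
--     m = min(history[p] for p in people)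
--     return next(p for p in people if history[p] == m)
-- ===== Notes on version B (the rewrite author's own statement) =====
-- stated objective: idiomatic
-- what changed: Replaces A's single interleaved scan carrying a running best person by staged passes: a membership-only search for the first unseen person, then a fold computing the minimum history count, then a search for the first person attaining that count.
import Mathlib
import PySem

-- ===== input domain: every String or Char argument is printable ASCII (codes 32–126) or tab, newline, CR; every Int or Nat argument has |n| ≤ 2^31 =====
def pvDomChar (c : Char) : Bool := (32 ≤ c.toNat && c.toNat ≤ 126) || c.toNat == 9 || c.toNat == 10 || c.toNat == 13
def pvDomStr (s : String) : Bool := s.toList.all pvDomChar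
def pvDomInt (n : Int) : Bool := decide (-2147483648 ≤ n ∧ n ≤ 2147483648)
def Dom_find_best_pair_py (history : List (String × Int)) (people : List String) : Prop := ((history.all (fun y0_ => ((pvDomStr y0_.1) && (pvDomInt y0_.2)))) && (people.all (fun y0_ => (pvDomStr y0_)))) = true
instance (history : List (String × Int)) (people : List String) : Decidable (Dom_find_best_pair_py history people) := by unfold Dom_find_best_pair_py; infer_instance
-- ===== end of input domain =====

-- B replaces A's single scan carrying a running best person by staged passes:
-- first-unseen search, then a fold computing the minimum count, then a search for
-- the first person attaining it — an idiomatic decomposition, same cost.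

-- ===== PORT A =====
-- A's loop: carry best_pair; return early on the first person not in history.
-- history[p] is only read on present keys (the branch guarantees it), so getD's 0 is unobserved.
def pvGoA (history : List (String × Int)) (best : String) : List String → String
  | [] => best
  | p :: rest =>
    if ((PySem.Dict.ofList history).get? p).isNone then p
    else if PySem.Dict.getD (PySem.Dict.ofList history) p 0 <
            PySem.Dict.getD (PySem.Dict.ofList history) best 0 then
      pvGoA history p rest
    else
      pvGoA history best rest

-- people[0] raises IndexError on empty people: excluded by Pre_; headD's default is unreachable there.
def find_best_pair_py (history : List (String × Int)) (people : List String) : String :=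
  pvGoA history (people.headD "") people

-- ===== PORT B =====
def pvCnt (history : List (String × Int)) (p : String) : Int :=
  PySem.Dict.getD (PySem.Dict.ofList history) p 0

-- Python's min over a nonempty sequence (min of [] raises ValueError: unreachable under Pre_).
def pvPyMin : List Int → Int
  | [] => 0
  | x :: xs => xs.foldl min x

def find_best_pair_py_alt (history : List (String × Int)) (people : List String) : String :=
  match people.find? (fun p => ((PySem.Dict.ofList history).get? p).isNone) with
  | some p => p
  | none =>
    let m := pvPyMin (people.map (pvCnt history))
    -- next(...) over a generator that always yields under Pre_: getD's default is unreachable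
    (people.find? (fun p => pvCnt history p == m)).getD ""

-- ===== PRECONDITION & SPEC =====
-- Pre_ excludes empty `people`, on which A raises IndexError at people[0] (and B raises ValueError).
def Pre_find_best_pair_py (history : List (String × Int)) (people : List String) : Prop :=
  people ≠ []
instance (history : List (String × Int)) (people : List String) :
    Decidable (Pre_find_best_pair_py history people) := by
  unfold Pre_find_best_pair_py; infer_instance

def pvWitness_find_best_pair_py : (List (String × Int)) × List String :=
  ([("a", 2), ("b", 1)], ["a", "b"])

def Spec_find_best_pair_py (history : List (String × Int)) (people : List String) (out : String) : Prop := out = find_best_pair_py_alt history people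
instance (history : List (String × Int)) (people : List String) (out : String) : Decidable (Spec_find_best_pair_py history people out) := by unfold Spec_find_best_pair_py; infer_instance

-- ===== CLAIM (what is proved, stated in full; the proofs are below) =====
def Claim_equal_find_best_pair_py : Prop := ∀ (history : List (String × Int)) (people : List String), Dom_find_best_pair_py history people → Pre_find_best_pair_py history people → Spec_find_best_pair_py history people (find_best_pair_py history people)

-- ===== LEMMAS AND PROOFS =====
-- foldl min never exceeds its seed
theorem pv_foldl_min_le (l : List Int) : ∀ a : Int, l.foldl min a ≤ a := by
  induction l with
  | nil => intro a; simp
  | cons x xs ih =>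
    intro a
    calc (x :: xs).foldl min a = xs.foldl min (min a x) := rfl
      _ ≤ min a x := ih (min a x)
      _ ≤ a := min_le_left a x

-- if some person in l is unseen, A's scan returns the first such person, whatever best is
theorem pv_scan_unseen (history : List (String × Int)) (l : List String) :
    ∀ (best q : String),
      l.find? (fun p => ((PySem.Dict.ofList history).get? p).isNone) = some q →
      pvGoA history best l = q := by
  induction l with
  | nil => intro best q h; simp at h
  | cons p xs ih =>
    intro best q h
    cases hp : ((PySem.Dict.ofList history).get? p).isNone with
    | true =>
      rw [List.find?_cons_of_pos (by simpa using hp)] at h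
      simp only [pvGoA, hp, if_true]
      exact (Option.some.inj h)
    | false =>
      rw [List.find?_cons_of_neg (by simp [hp])] at h
      simp only [pvGoA, hp, Bool.false_eq_true, if_false]
      split_ifs with _
      · exact ih p q h
      · exact ih best q h

-- all of l seen: A's scan from `best` is `best` unless l's minimum count beats it,
-- in which case it is the first person attaining that minimum
theorem pv_scan_min (history : List (String × Int)) (l : List String) :
    ∀ best : String,
      l.find? (fun p => ((PySem.Dict.ofList history).get? p).isNone) = none →
      pvGoA history best l =
        ((l.map (pvCnt history)).min?).elim best (fun m =>
          if m < pvCnt history best then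
            (l.find? (fun p => pvCnt history p == m)).getD best
          else best) := by
  induction l with
  | nil => intro best _; simp [pvGoA]
  | cons p xs ih =>
    intro best hpres
    have hall := List.find?_eq_none.mp hpres
    have hp : ((PySem.Dict.ofList history).get? p).isNone = false := by
      simpa only [Bool.not_eq_true] using hall p List.mem_cons_self
    have htail : xs.find? (fun p => ((PySem.Dict.ofList history).get? p).isNone) = none :=
      List.find?_eq_none.mpr (fun x hx => hall x (List.mem_cons_of_mem _ hx))
    simp only [pvGoA, hp, Bool.false_eq_true, if_false, List.map_cons]
    cases hm : (xs.map (pvCnt history)).min? with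
    | none =>
      have hxs : xs = [] := by simpa using List.min?_eq_none_iff.mp hm
      subst hxs
      by_cases h : PySem.Dict.getD (PySem.Dict.ofList history) p 0 <
          PySem.Dict.getD (PySem.Dict.ofList history) best 0
      · simp [pvGoA, pvCnt, List.min?, h]
      · simp [pvGoA, pvCnt, List.min?, h]
    | some m =>
      have hmin : (pvCnt history p :: xs.map (pvCnt history)).min? =
          some (min (pvCnt history p) m) := by
        rw [List.min?_cons, hm]; rfl
      rw [hmin]
      simp only [Option.elim]
      have hmem : m ∈ xs.map (pvCnt history) := List.min?_mem hm
      obtain ⟨q, hq, hqm⟩ := List.mem_map.mp hmem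
      obtain ⟨r, hr⟩ : ∃ r, xs.find? (fun x => pvCnt history x == m) = some r := by
        cases hfs : xs.find? (fun x => pvCnt history x == m) with
        | none => exact absurd hqm (by simpa using List.find?_eq_none.mp hfs q hq)
        | some r => exact ⟨r, rfl⟩
      by_cases hcb : PySem.Dict.getD (PySem.Dict.ofList history) p 0 <
          PySem.Dict.getD (PySem.Dict.ofList history) best 0
      · rw [if_pos hcb, ih p htail, hm]
        simp only [Option.elim]
        by_cases hmc : m < pvCnt history p
        · rw [if_pos hmc]
          have h1 : min (pvCnt history p) m = m := min_eq_right (le_of_lt hmc)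
          have h2 : m < pvCnt history best :=
            lt_trans hmc (by simpa [pvCnt] using hcb)
          rw [h1, if_pos h2]
          have hhd : (pvCnt history p == m) = false := by
            simp only [beq_eq_false_iff_ne]; omega
          rw [List.find?_cons_of_neg (by simp [hhd]), hr]
          simp
        · rw [if_neg hmc]
          have h1 : min (pvCnt history p) m = pvCnt history p :=
            min_eq_left (le_of_not_gt hmc)
          rw [h1, if_pos (by simpa [pvCnt] using hcb)]
          rw [List.find?_cons_of_pos (by simp)]
          simp
      · rw [if_neg hcb, ih best htail, hm]
        simp only [Option.elim]
        have hbc : pvCnt history best ≤ pvCnt history p := by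
          simpa [pvCnt] using le_of_not_gt hcb
        by_cases hmb : m < pvCnt history best
        · rw [if_pos hmb]
          have h1 : min (pvCnt history p) m = m :=
            min_eq_right (le_of_lt (lt_of_lt_of_le hmb hbc))
          rw [h1, if_pos hmb]
          have hhd : (pvCnt history p == m) = false := by
            simp only [beq_eq_false_iff_ne]; omega
          rw [List.find?_cons_of_neg (by simp [hhd])]
        · rw [if_neg hmb]
          have hnot : ¬ min (pvCnt history p) m < pvCnt history best :=
            not_lt.mpr (le_min hbc (le_of_not_gt hmb))
          rw [if_neg hnot]

-- ===== VERDICT (by name: the statement is the Claim_ definition above) =====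
theorem find_best_pair_py_spec : Claim_equal_find_best_pair_py := by
  intro history people _ hpre
  unfold Spec_find_best_pair_py find_best_pair_py find_best_pair_py_alt
  cases people with
  | nil => exact absurd rfl hpre
  | cons p rest =>
    cases hf : (p :: rest).find? (fun q => ((PySem.Dict.ofList history).get? q).isNone) with
    | some q => simpa using pv_scan_unseen history (p :: rest) ((p :: rest).headD "") q hf
    | none =>
      rw [pv_scan_min history (p :: rest) _ hf]
      simp only [List.headD, List.map_cons, List.min?, pvPyMin, Option.elim]
      have hMle := pv_foldl_min_le (rest.map (pvCnt history)) (pvCnt history p)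
      by_cases hMc : (rest.map (pvCnt history)).foldl min (pvCnt history p) < pvCnt history p
      · rw [if_pos hMc]
        have hhd : (pvCnt history p ==
            (rest.map (pvCnt history)).foldl min (pvCnt history p)) = false := by
          simp only [beq_eq_false_iff_ne]; omega
        rw [List.find?_cons_of_neg (by simp [hhd])]
        have hmem : (rest.map (pvCnt history)).foldl min (pvCnt history p) ∈
            pvCnt history p :: rest.map (pvCnt history) :=
          List.min?_mem (xs := pvCnt history p :: rest.map (pvCnt history)) rfl
        have hmem' : (rest.map (pvCnt history)).foldl min (pvCnt history p) ∈
            rest.map (pvCnt history) := by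
          rcases List.mem_cons.mp hmem with h | h
          · omega
          · exact h
        obtain ⟨q, hq, hqm⟩ := List.mem_map.mp hmem'
        cases hfs : rest.find? (fun x => pvCnt history x ==
            (rest.map (pvCnt history)).foldl min (pvCnt history p)) with
        | none => exact absurd hqm (by simpa using List.find?_eq_none.mp hfs q hq)
        | some r => simp
      · rw [if_neg hMc]
        have hcM : pvCnt history p = (rest.map (pvCnt history)).foldl min (pvCnt history p) :=
          le_antisymm (le_of_not_gt hMc) hMle
        rw [List.find?_cons_of_pos (by simp [← hcM])]
        simp
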